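-- pv_equiv track=rewrite | github.com/Tjarke/Codewars_challenges | 6kyu_Sort_the_odd.py | sort_array
-- ===== SOURCE A (Python) =====
-- def sort_array(source_array):
--     odds = []
--     pos = []
--     for cnt, val in enumerate(source_array):
--         if val%2 != 0:
--             odds.append(val)
--             pos.append(cnt)
--     odds.sort()
--
--     ans = source_array
--     for i,j in zip(pos,odds):
--         ans[i] = j
--     return ans
-- ===== SOURCE B (Python) =====
-- def sort_array(source_array):
--     # Selection strategy: no sort at all -- for each odd slot, in order,
--     # extract the minimum of the remaining odd values and write it in place.
--     remaining = [v for v in source_array if v % 2 != 0]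
--     for i, v in enumerate(source_array):
--         if v % 2 != 0:
--             m = min(remaining)
--             remaining.remove(m)
--             source_array[i] = m
--     return source_array
-- ===== Notes on version B (the rewrite author's own statement) =====
-- stated objective: alternative
-- what changed: B never sorts: instead of A's sort of the odds plus a zip-writeback over a positions list, B does selection by repeated min-extraction -- for each odd slot in order it takes min(remaining) out of the pool of remaining odd values and assigns it in place.
import Mathlib
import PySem

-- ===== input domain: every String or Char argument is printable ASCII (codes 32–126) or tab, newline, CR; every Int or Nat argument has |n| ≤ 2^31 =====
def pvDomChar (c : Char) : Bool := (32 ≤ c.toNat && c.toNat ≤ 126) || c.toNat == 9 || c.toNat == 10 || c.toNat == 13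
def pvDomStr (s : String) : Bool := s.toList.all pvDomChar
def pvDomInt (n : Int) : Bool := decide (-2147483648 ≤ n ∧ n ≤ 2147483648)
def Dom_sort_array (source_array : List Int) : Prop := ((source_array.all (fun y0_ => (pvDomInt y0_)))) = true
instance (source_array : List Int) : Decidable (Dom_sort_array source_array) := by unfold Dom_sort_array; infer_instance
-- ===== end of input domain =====

-- B replaces A's sort-the-odds-and-zip-writeback by selection without sorting: for each odd
-- slot in order it extracts min(remaining) from the pool of remaining odd values (alternative).
-- Both Pythons mutate source_array in place; the equivalence proved here is about the returned value.

-- Python's 'v % 2 != 0' (shared tiny parity test of both sources)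
def oddb (x : Int) : Bool := PySem.Int.mod x 2 != 0

-- ===== PORT A =====
def sort_array (source_array : List Int) : List Int :=
  -- the enumerate loop collecting (odds, pos)
  let op := (PySem.List.enumerate source_array).foldl
    (fun (st : List Int × List Int) cv =>
      if oddb cv.2 then (st.1 ++ [cv.2], st.2 ++ [cv.1]) else st)
    ([], [])
  let odds := PySem.List.sorted op.1 (fun x => x) false
  -- 'ans = source_array; for i,j in zip(pos,odds): ans[i] = j'
  (List.zip op.2 odds).foldl (fun ans (ij : Int × Int) => PySem.List.pySetD ans ij.1 ij.2) source_array

-- ===== PORT B =====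
-- the enumerate pass: at each odd element take m = min(remaining), remove it, assign it there;
-- the 'none' branches (min()/remove on an exhausted pool) are unreachable since one value is
-- pooled per odd slot, and mirror where Python's min([]) would raise
def fillMin : List Int → List Int → List Int
  | [], _ => []
  | x :: t, rem =>
    if oddb x then
      match PySem.List.min? rem (fun y => y) with
      | some m => m :: fillMin t ((PySem.List.remove? rem m).getD rem)
      | none => x :: fillMin t rem
    else x :: fillMin t rem

def sort_array_alt (source_array : List Int) : List Int :=
  fillMin source_array (source_array.filter (fun v => oddb v))

-- ===== PRECONDITION & SPEC =====
def Spec_sort_array (source_array : List Int) (out : List Int) : Prop := out = sort_array_alt source_array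
instance (source_array : List Int) (out : List Int) : Decidable (Spec_sort_array source_array out) := by unfold Spec_sort_array; infer_instance

-- ===== CLAIM (what is proved, stated in full; the proofs are below) =====
def Claim_equal_sort_array : Prop := ∀ (source_array : List Int), Dom_sort_array source_array → Spec_sort_array source_array (sort_array source_array)

-- ===== LEMMAS AND PROOFS =====

/-- proof-side middle form: place the elements of ys (in order) at the odd slots of xs -/
def sortArrayPass : List Int → List Int → List Int
  | [], _ => []
  | x :: t, ys =>
    if oddb x then
      match ys with
      | y :: ys' => y :: sortArrayPass t ys'
      | [] => x :: sortArrayPass t []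
    else x :: sortArrayPass t ys

/-- positions (as Ints, starting at s) of the odd elements of xs -/
def posns : List Int → Int → List Int
  | [], _ => []
  | x :: t, s => if oddb x then s :: posns t (s + 1) else posns t (s + 1)

lemma posns_shift (xs : List Int) (s : Int) :
    posns xs (s + 1) = (posns xs s).map (· + 1) := by
  induction xs generalizing s with
  | nil => simp [posns]
  | cons x t ih => by_cases h : oddb x = true <;> simp [posns, h, ih]

lemma posns_ge (xs : List Int) (s : Int) : ∀ p ∈ posns xs s, s ≤ p := by
  induction xs generalizing s with
  | nil => simp [posns]
  | cons x t ih =>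
    intro p hp
    by_cases h : oddb x = true <;> simp [posns, h] at hp
    · rcases hp with rfl | hp
      · exact le_refl _
      · have := ih (s + 1) p hp; omega
    · have := ih (s + 1) p hp; omega

lemma collect_eq (xs : List Int) (s : Int) (o p : List Int) :
    (PySem.List.enumerate xs s).foldl
      (fun (st : List Int × List Int) cv =>
        if oddb cv.2 then (st.1 ++ [cv.2], st.2 ++ [cv.1]) else st)
      (o, p)
    = (o ++ xs.filter (fun x => oddb x), p ++ posns xs s) := by
  induction xs generalizing s o p with
  | nil => simp [PySem.List.enumerate_nil, posns]
  | cons x t ih =>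
    by_cases h : oddb x = true <;>
      simp [PySem.List.enumerate_cons, h, posns, ih]

lemma pySetD_cons_succ (a : Int) (acc : List Int) (i v : Int) (hi : 0 ≤ i) :
    PySem.List.pySetD (a :: acc) (i + 1) v = a :: PySem.List.pySetD acc i v := by
  rw [PySem.List.pySetD_of_nonneg _ _ (by omega : (0:Int) ≤ i + 1), PySem.List.pySetD_of_nonneg _ _ hi]
  have : (i + 1).toNat = i.toNat + 1 := by omega
  simp [this]

lemma foldl_set_shift (ps : List (Int × Int)) (a : Int) (acc : List Int)
    (h : ∀ p ∈ ps, 0 ≤ p.1) :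
    (ps.map (Prod.map (· + 1) id)).foldl
        (fun l (p : Int × Int) => PySem.List.pySetD l p.1 p.2) (a :: acc)
    = a :: ps.foldl (fun l (p : Int × Int) => PySem.List.pySetD l p.1 p.2) acc := by
  induction ps generalizing acc with
  | nil => simp
  | cons q qs ih =>
    simp only [List.map_cons, List.foldl_cons, Prod.map, id]
    rw [pySetD_cons_succ _ _ _ _ (h q (by simp))]
    exact ih _ (fun p hp => h p (by simp [hp]))

lemma pass_nil (xs : List Int) : sortArrayPass xs [] = xs := by
  induction xs with
  | nil => rfl
  | cons x t ih => by_cases h : oddb x = true <;> simp [sortArrayPass, h, ih]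

lemma zip_posns_nonneg (t ys : List Int) :
    ∀ p ∈ List.zip (posns t 0) ys, 0 ≤ (p : Int × Int).1 :=
  fun p hp => posns_ge t 0 p.1 (List.of_mem_zip hp).1

lemma writeback_eq_pass (xs ys : List Int) :
    (List.zip (posns xs 0) ys).foldl
        (fun ans (ij : Int × Int) => PySem.List.pySetD ans ij.1 ij.2) xs
    = sortArrayPass xs ys := by
  induction xs generalizing ys with
  | nil => simp [posns, sortArrayPass]
  | cons x t ih =>
    have hshift : posns t (0 + 1) = (posns t 0).map (· + 1) := posns_shift t 0
    by_cases h : oddb x = true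
    · cases ys with
      | nil => simp [posns, h, sortArrayPass, pass_nil]
      | cons y ys' =>
        simp only [posns, h, if_pos, sortArrayPass, hshift, List.zip_cons_cons,
          List.zip_map_left, List.foldl_cons]
        have hset : PySem.List.pySetD (x :: t) (0 : Int) y = y :: t := by
          rw [PySem.List.pySetD_of_nonneg _ _ (le_refl (0:Int))]; rfl
        rw [hset, foldl_set_shift _ _ _ (zip_posns_nonneg t ys'), ih]
    · simp only [posns, h, if_neg, Bool.false_eq_true, not_false_iff,
        sortArrayPass, hshift, List.zip_map_left]
      rw [foldl_set_shift _ _ _ (zip_posns_nonneg t ys), ih]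

/-- selecting the minimum peels the head off the sorted list -/
lemma sorted_cons_min (rem : List Int) (m : Int)
    (hm : PySem.List.min? rem (fun y => y) = some m) :
    PySem.List.sorted rem (fun y => y) false
      = m :: PySem.List.sorted (rem.erase m) (fun y => y) false := by
  have hmem : m ∈ rem := PySem.List.min?_mem hm
  have hmin : ∀ y ∈ rem, m ≤ y := fun y hy => PySem.List.min?_isMin hm y hy
  refine PySem.List.sorted_id_eq_of_perm_of_pairwise rem _ ?_ ?_
  · exact (List.Perm.cons m (PySem.List.sorted_perm _ _ _)).trans
      (List.perm_cons_erase hmem).symm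
  · refine List.pairwise_cons.mpr ⟨?_, ?_⟩
    · intro y hy
      have : y ∈ rem.erase m := (PySem.List.mem_sorted _ _ _ _).mp hy
      exact hmin y (List.mem_of_mem_erase this)
    · exact PySem.List.sorted_pairwise _ _

lemma fillMin_eq_pass (xs rem : List Int) :
    fillMin xs rem = sortArrayPass xs (PySem.List.sorted rem (fun y => y) false) := by
  induction xs generalizing rem with
  | nil => rfl
  | cons x t ih =>
    by_cases h : oddb x = true
    · rcases hrem : PySem.List.min? rem (fun y => y) with _ | m
      · have : rem = [] := (PySem.List.min?_eq_none_iff _ _).mp hrem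
        subst this
        simp [fillMin, sortArrayPass, h, hrem, ih, PySem.List.sorted]
      · have hmem : m ∈ rem := PySem.List.min?_mem hrem
        have hrm : PySem.List.remove? rem m = some (rem.erase m) :=
          PySem.List.remove?_eq_some_erase rem m hmem
        rw [sorted_cons_min rem m hrem]
        simp [fillMin, sortArrayPass, h, hrem, hrm, ih]
    · simp [fillMin, sortArrayPass, h, ih]

theorem sort_array_eq_alt (xs : List Int) : sort_array xs = sort_array_alt xs := by
  unfold sort_array sort_array_alt
  simp only [collect_eq, List.nil_append]
  rw [writeback_eq_pass, fillMin_eq_pass]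

-- ===== VERDICT (by name: the statement is the Claim_ definition above) =====
theorem sort_array_spec : Claim_equal_sort_array := by
  intro xs _
  unfold Spec_sort_array
  exact sort_array_eq_alt xs
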